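-- pv_equiv track=rewrite | github.com/goutam-kul/puresoft-lt-agent-sub | src/llm_handler/actions.py | set_language
-- ===== SOURCE A (Python) =====
-- from typing import List, Dict, Any
--
-- accepted_languages = ['hindi', 'english', 'spanish', 'japnese', 'italian', 'spanish', 'mandarin', 'russian'
--                       ]
--
-- def set_language(context: str) -> Dict[str, Any]:
--     """Get the language the user want to learn"""
--
--     text = context.lower().split()
--     for lang in text:
--         if lang in accepted_languages:
--             selected_language = lang
--     return {
--         "response": f"Sure I can help you learn {selected_language}."
--     }
-- ===== SOURCE B (Python) =====
-- from typing import List, Dict, Any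
--
-- accepted_languages = ['hindi', 'english', 'spanish', 'japnese', 'italian', 'spanish', 'mandarin', 'russian'
--                       ]
--
-- def set_language(context: str) -> Dict[str, Any]:
--     """Get the language the user want to learn"""
--     for lang in reversed(context.lower().split()):
--         if lang in accepted_languages:
--             selected_language = lang
--             break
--     return {
--         "response": f"Sure I can help you learn {selected_language}."
--     }
-- ===== Notes on version B (the rewrite author's own statement) =====
-- stated objective: alternative
-- what changed: B scans the lowercased words in reverse and stops at the first accepted language (early termination), instead of A's full forward scan that keeps overwriting the last match.
import Mathlib
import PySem

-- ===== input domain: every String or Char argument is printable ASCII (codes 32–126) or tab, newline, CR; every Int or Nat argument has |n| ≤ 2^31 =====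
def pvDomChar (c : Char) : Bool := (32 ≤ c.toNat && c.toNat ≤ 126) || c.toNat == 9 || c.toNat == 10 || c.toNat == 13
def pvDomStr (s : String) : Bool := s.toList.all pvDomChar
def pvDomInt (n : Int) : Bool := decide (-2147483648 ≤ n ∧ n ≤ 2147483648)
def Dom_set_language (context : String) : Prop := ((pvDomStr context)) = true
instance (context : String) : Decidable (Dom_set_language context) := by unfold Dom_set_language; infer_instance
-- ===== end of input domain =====

-- B changes the traversal: reverse scan with early break at the first accepted word,
-- instead of A's full forward scan overwriting the last match (objective: alternative).

def pvAccepted : List String :=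
  ["hindi", "english", "spanish", "japnese", "italian", "spanish", "mandarin", "russian"]

-- ===== PORT A =====
-- forward loop: 'for lang in text: if lang in accepted_languages: selected_language = lang'
-- The Option accumulator models the possibly-unbound local; 'none' at the end is Python's
-- UnboundLocalError, excluded by Pre_ (the [] branch is unreachable under Pre_).
def set_language (context : String) : List (String × String) :=
  let text := PySem.Str.split₀ (PySem.Str.lower context)
  let selected :=
    text.foldl (fun acc lang => if lang ∈ pvAccepted then some lang else acc)
      (none : Option String)
  match selected with
  | some l => [("response", "Sure I can help you learn " ++ l ++ ".")]
  | none => []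

-- ===== PORT B =====
-- B's loop with break: first accepted word of the reversed word list.
def pvFirstAccepted : List String → Option String
  | [] => none
  | lang :: rest => if lang ∈ pvAccepted then some lang else pvFirstAccepted rest

def set_language_alt (context : String) : List (String × String) :=
  match pvFirstAccepted (PySem.Str.split₀ (PySem.Str.lower context)).reverse with
  | some l => [("response", "Sure I can help you learn " ++ l ++ ".")]
  | none => []

-- ===== PRECONDITION & SPEC =====
-- Pre_ excludes contexts none of whose lowercased words is an accepted language:
-- there both Pythons raise UnboundLocalError.
def Pre_set_language (context : String) : Prop :=
  ∃ w ∈ PySem.Str.split₀ (PySem.Str.lower context), w ∈ pvAccepted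
instance (context : String) : Decidable (Pre_set_language context) := by
  unfold Pre_set_language; infer_instance
def pvWitness_set_language : String := "I want to learn English today"

def Spec_set_language (context : String) (out : List (String × String)) : Prop := out = set_language_alt context
instance (context : String) (out : List (String × String)) : Decidable (Spec_set_language context out) := by unfold Spec_set_language; infer_instance

-- ===== CLAIM (what is proved, stated in full; the proofs are below) =====
def Claim_equal_set_language : Prop := ∀ (context : String), Dom_set_language context → Pre_set_language context → Spec_set_language context (set_language context)

-- ===== LEMMAS AND PROOFS =====

theorem pvFirstAccepted_append (xs ys : List String) :
    pvFirstAccepted (xs ++ ys) =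
      match pvFirstAccepted xs with
      | some l => some l
      | none => pvFirstAccepted ys := by
  induction xs with
  | nil => simp [pvFirstAccepted]
  | cons x xs ih =>
    simp only [List.cons_append, pvFirstAccepted]
    split_ifs <;> simp [ih]

theorem pv_last_eq_first_rev (ws : List String) (acc : Option String) :
    ws.foldl (fun a lang => if lang ∈ pvAccepted then some lang else a) acc =
      match pvFirstAccepted ws.reverse with
      | some l => some l
      | none => acc := by
  induction ws generalizing acc with
  | nil => simp [pvFirstAccepted]
  | cons w ws ih =>
    simp only [List.foldl_cons, List.reverse_cons, pvFirstAccepted_append, ih]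
    cases pvFirstAccepted ws.reverse with
    | some l => simp
    | none => simp [pvFirstAccepted]; split_ifs <;> simp

-- ===== VERDICT (by name: the statement is the Claim_ definition above) =====
theorem set_language_spec : Claim_equal_set_language := by
  intro context _ _
  unfold Spec_set_language set_language set_language_alt
  simp only [pv_last_eq_first_rev]
  cases pvFirstAccepted (PySem.Str.split₀ (PySem.Str.lower context)).reverse <;> rfl
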